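-- pv_equiv track=rewrite | github.com/takapdayon/atcoder | abc/AtCoderBeginnerContest098/B.py | CutandCount
-- ===== SOURCE A (Python) =====
-- def CutandCount(n , s):
--
--     ans = 0
--
--     for i in range(1 , n + 1):
--         count = 0
--         for w in range(ord('a'), ord('z') + 1):
--             if chr(w) in s[:i] and chr(w) in s[i:]:
--                 count += 1
--
--         ans = max(ans , count)
--
--     return ans
-- ===== SOURCE B (Python) =====
-- def CutandCount(n, s):
--     m = len(s)
--     limit = m if m < n else (n if n > 0 else 0)
--     suf = [0] * 26
--     for ch in s:
--         k = ord(ch) - 97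
--         if 0 <= k < 26:
--             suf[k] += 1
--     pre = [False] * 26
--     shared = 0
--     ans = 0
--     for ch in s[:limit]:
--         k = ord(ch) - 97
--         if 0 <= k < 26:
--             suf[k] -= 1
--             if not pre[k]:
--                 pre[k] = True
--                 if suf[k] > 0:
--                     shared += 1
--             elif suf[k] == 0:
--                 shared -= 1
--         if shared > ans:
--             ans = shared
--     return ans
-- ===== Notes on version B (the rewrite author's own statement) =====
-- stated objective: faster
-- what changed: A rescans both halves of the string for each of the 26 letters at every cut position (O(26*n^2)); B makes one counting pass to build a per-letter suffix counter, then a single left-to-right sweep that moves each character into a prefix seen-table and updates the number of shared letters incrementally, tracking the running maximum (O(n)).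
import Mathlib
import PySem

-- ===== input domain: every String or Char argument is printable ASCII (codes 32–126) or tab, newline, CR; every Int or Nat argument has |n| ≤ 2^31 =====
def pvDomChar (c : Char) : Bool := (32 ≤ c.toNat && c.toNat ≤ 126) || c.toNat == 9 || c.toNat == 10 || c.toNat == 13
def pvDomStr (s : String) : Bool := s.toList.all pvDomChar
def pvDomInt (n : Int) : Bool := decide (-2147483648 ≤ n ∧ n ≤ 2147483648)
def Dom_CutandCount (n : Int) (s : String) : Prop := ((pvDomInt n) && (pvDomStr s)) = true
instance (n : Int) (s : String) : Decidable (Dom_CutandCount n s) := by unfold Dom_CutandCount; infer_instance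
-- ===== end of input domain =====

-- B replaces A's rescan of both halves for all 26 letters at every cut (O(26·n²)) by one
-- counting pass plus one left-to-right sweep that moves each character from a suffix
-- counter to a prefix seen-table and keeps the shared-letter count incrementally (O(n)).

-- ===== PORT A =====
-- chr(w) is ported as Char.ofNat w.toNat — exact here since w ranges over 97..122 (ASCII).
def CutandCount (n : Int) (s : String) : Int :=
  (PySem.List.pyRange 1 (n + 1) 1).foldl (fun ans i =>
    let count : Int := (PySem.List.pyRange 97 123 1).foldl (fun count w =>
      if PySem.Chars.isIn [Char.ofNat w.toNat] (PySem.List.slice s.toList none (some i)) &&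
         PySem.Chars.isIn [Char.ofNat w.toNat] (PySem.List.slice s.toList (some i) none)
      then count + 1 else count) 0
    max ans count) 0

-- ===== PORT B =====
def CutandCount_alt (n : Int) (s : String) : Int :=
  let t := s.toList
  let m : Int := (t.length : Int)
  let limit : Int := if m < n then m else if 0 < n then n else 0
  let suf : List Int := t.foldl (fun suf ch =>
    let k : Int := (ch.toNat : Int) - 97
    if 0 ≤ k ∧ k < 26 then
      PySem.List.pySetD suf k (PySem.List.pyGetD suf k 0 + 1)
    else suf) (List.replicate 26 0)
  let res := (PySem.List.slice t none (some limit)).foldl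
    (fun (st : List Int × List Bool × Int × Int) ch =>
      let k : Int := (ch.toNat : Int) - 97
      let st' :=
        if 0 ≤ k ∧ k < 26 then
          let suf := PySem.List.pySetD st.1 k (PySem.List.pyGetD st.1 k 0 - 1)
          if PySem.List.pyGetD st.2.1 k false = false then
            let pre := PySem.List.pySetD st.2.1 k true
            if 0 < PySem.List.pyGetD suf k 0 then (suf, pre, st.2.2.1 + 1) else (suf, pre, st.2.2.1)
          else
            if PySem.List.pyGetD suf k 0 = 0 then (suf, st.2.1, st.2.2.1 - 1) else (suf, st.2.1, st.2.2.1)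
        else (st.1, st.2.1, st.2.2.1)
      (st'.1, st'.2.1, st'.2.2, if st.2.2.2 < st'.2.2 then st'.2.2 else st.2.2.2))
    (suf, List.replicate 26 false, 0, 0)
  res.2.2.2

-- ===== PRECONDITION & SPEC =====
def Spec_CutandCount (n : Int) (s : String) (out : Int) : Prop := out = CutandCount_alt n s
instance (n : Int) (s : String) (out : Int) : Decidable (Spec_CutandCount n s out) := by unfold Spec_CutandCount; infer_instance

-- ===== CLAIM (what is proved, stated in full; the proofs are below) =====
def Claim_equal_CutandCount : Prop := ∀ (n : Int) (s : String), Dom_CutandCount n s → Spec_CutandCount n s (CutandCount n s)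

-- ===== LEMMAS AND PROOFS =====

-- the j-th lowercase letter, j < 26
def lchar (j : Nat) : Char := Char.ofNat (97 + j)

-- number of letters occurring in both halves of the cut after position k
def cnt (t : List Char) (k : Nat) : Int :=
  ∑ j ∈ Finset.range 26, (if lchar j ∈ t.take k ∧ lchar j ∈ t.drop k then (1 : Int) else 0)

-- running maximum of cnt over cut positions 1..k
def runMax (t : List Char) : Nat → Int
  | 0 => 0
  | k + 1 => max (runMax t k) (cnt t (k + 1))

-- named copies of B's loop bodies (definitionally the lambdas inside CutandCount_alt)
def BsufStep (suf : List Int) (ch : Char) : List Int :=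
  let k : Int := (ch.toNat : Int) - 97
  if 0 ≤ k ∧ k < 26 then
    PySem.List.pySetD suf k (PySem.List.pyGetD suf k 0 + 1)
  else suf

def Bstep (st : List Int × List Bool × Int × Int) (ch : Char) : List Int × List Bool × Int × Int :=
  let k : Int := (ch.toNat : Int) - 97
  let st' :=
    if 0 ≤ k ∧ k < 26 then
      let suf := PySem.List.pySetD st.1 k (PySem.List.pyGetD st.1 k 0 - 1)
      if PySem.List.pyGetD st.2.1 k false = false then
        let pre := PySem.List.pySetD st.2.1 k true
        if 0 < PySem.List.pyGetD suf k 0 then (suf, pre, st.2.2.1 + 1) else (suf, pre, st.2.2.1)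
      else
        if PySem.List.pyGetD suf k 0 = 0 then (suf, st.2.1, st.2.2.1 - 1) else (suf, st.2.1, st.2.2.1)
    else (st.1, st.2.1, st.2.2.1)
  (st'.1, st'.2.1, st'.2.2, if st.2.2.2 < st'.2.2 then st'.2.2 else st.2.2.2)

def Blimit (n : Int) (t : List Char) : Int :=
  if (t.length : Int) < n then (t.length : Int) else if 0 < n then n else 0

lemma alt_eq (n : Int) (s : String) : CutandCount_alt n s =
    ((PySem.List.slice s.toList none (some (Blimit n s.toList))).foldl Bstep
      (s.toList.foldl BsufStep (List.replicate 26 0), List.replicate 26 false, 0, 0)).2.2.2 := rfl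

lemma lchar_toNat (j : Nat) (hj : j < 26) : (lchar j).toNat = 97 + j := by
  have hv : Nat.isValidChar (97 + j) := Or.inl (by omega)
  simp [lchar, Char.ofNat, hv]

lemma lchar_eq_iff (j : Nat) (hj : j < 26) (ch : Char) : lchar j = ch ↔ ch.toNat = 97 + j := by
  constructor
  · rintro rfl; exact lchar_toNat j hj
  · intro h
    have : Char.ofNat ch.toNat = ch := Char.ofNat_toNat ch
    rw [← this, h]; rfl

lemma lchar_ne_of_not_low (j : Nat) (hj : j < 26) (ch : Char)
    (h : ¬ (97 ≤ ch.toNat ∧ ch.toNat < 123)) : lchar j ≠ ch := by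
  intro he
  have := (lchar_eq_iff j hj ch).mp he
  omega

lemma singleton_infix_iff (c : Char) (l : List Char) : [c] <:+: l ↔ c ∈ l := by
  constructor
  · exact fun h => h.sublist.mem (List.mem_singleton_self c)
  · intro h; obtain ⟨u, v, rfl⟩ := List.append_of_mem h; exact ⟨u, v, by simp⟩

lemma cnt_zero (t : List Char) : cnt t 0 = 0 := by
  simp [cnt]

lemma cnt_of_len_le (t : List Char) (k : Nat) (h : t.length ≤ k) : cnt t k = 0 := by
  unfold cnt
  rw [List.drop_eq_nil_of_le h]
  simp

lemma runMax_nonneg (t : List Char) (k : Nat) : 0 ≤ runMax t k := by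
  induction k with
  | zero => simp [runMax]
  | succ k ih => exact le_trans ih (le_max_left _ _)

lemma runMax_of_len_le (t : List Char) (N : Nat) (h : t.length ≤ N) :
    runMax t N = runMax t t.length := by
  induction N with
  | zero => have : t.length = 0 := by omega
            rw [this]
  | succ N ih =>
    rcases Nat.lt_or_ge N t.length with h' | h'
    · have : t.length = N + 1 := by omega
      rw [this]
    · rw [runMax, cnt_of_len_le t (N+1) (by omega), ih h']
      have := runMax_nonneg t N
      rw [← ih h']
      omega

-- ===== A-side =====

lemma A_inner (t : List Char) (i : Int) (h : 0 ≤ i) :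
    (PySem.List.pyRange 97 123 1).foldl (fun count w =>
      if PySem.Chars.isIn [Char.ofNat w.toNat] (PySem.List.slice t none (some i)) &&
         PySem.Chars.isIn [Char.ofNat w.toNat] (PySem.List.slice t (some i) none)
      then count + 1 else count) (0 : Int) = cnt t i.toNat := by
  rw [PySem.List.slice_to t h, PySem.List.slice_from t h, PySem.List.foldl_count_if, zero_add,
    PySem.List.pyRange_one, List.countP_map]
  have h26 : ((123 : Int) - 97).toNat = 26 := by decide
  rw [h26]
  have hc : List.countP
      ((fun w => PySem.Chars.isIn [Char.ofNat w.toNat] (t.take i.toNat) &&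
                 PySem.Chars.isIn [Char.ofNat w.toNat] (t.drop i.toNat)) ∘ (fun k : Nat => (97 : Int) + k))
      (List.range 26)
      = List.countP (fun j => decide (lchar j ∈ t.take i.toNat ∧ lchar j ∈ t.drop i.toNat)) (List.range 26) := by
    apply List.countP_congr
    intro j hj
    have hj26 : j < 26 := List.mem_range.mp hj
    have ht : ((97 : Int) + j).toNat = 97 + j := by omega
    simp only [Function.comp, ht, Bool.and_eq_true, decide_eq_true_eq]
    rw [show Char.ofNat (97 + j) = lchar j from rfl]
    rw [PySem.Chars.isIn_iff_infix, PySem.Chars.isIn_iff_infix,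
      singleton_infix_iff, singleton_infix_iff]
  rw [hc, ← PySem.List.sum_map_ite_one_zero
        (fun j => decide (lchar j ∈ t.take i.toNat ∧ lchar j ∈ t.drop i.toNat)) (List.range 26)]
  unfold cnt
  rw [show (∑ j ∈ Finset.range 26, (if lchar j ∈ t.take i.toNat ∧ lchar j ∈ t.drop i.toNat then (1:Int) else 0))
        = ((List.range 26).map (fun j => if lchar j ∈ t.take i.toNat ∧ lchar j ∈ t.drop i.toNat then (1:Int) else 0)).sum from rfl]
  congr 1
  apply List.map_congr_left
  intro j _
  simp

lemma A_fold_max (t : List Char) (g : Int → Int)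
    (hg : ∀ i : Int, 1 ≤ i → g i = cnt t i.toNat) (N : Nat) :
    (PySem.List.pyRange 1 ((N : Int) + 1) 1).foldl (fun ans i => max ans (g i)) 0 = runMax t N := by
  induction N with
  | zero => rw [PySem.List.pyRange_one_eq_nil (by norm_num)]; rfl
  | succ N ih =>
    rw [show ((N + 1 : Nat) : Int) + 1 = ((N : Int) + 1) + 1 by push_cast; ring,
      PySem.List.pyRange_one_succ_right (by omega), List.foldl_append, ih]
    simp only [List.foldl_cons, List.foldl_nil]
    rw [hg ((N : Int) + 1) (by omega)]
    have : (((N : Int) + 1)).toNat = N + 1 := by omega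
    rw [this]
    rfl

lemma A_eq_runMax (n : Int) (s : String) : CutandCount n s = runMax s.toList n.toNat := by
  unfold CutandCount
  by_cases hn : n ≤ 0
  · rw [show PySem.List.pyRange 1 (n + 1) 1 = [] from PySem.List.pyRange_one_eq_nil (by omega)]
    have h0 : n.toNat = 0 := by omega
    rw [h0, List.foldl_nil]
    simp [runMax]
  · have hcast : n = ((n.toNat : Nat) : Int) := by omega
    rw [hcast]
    exact A_fold_max s.toList _ (fun i hi => A_inner s.toList i (by omega)) n.toNat

-- ===== B-side =====

lemma count_cons_lchar_eq (t : List Char) (ch : Char) (j : Nat) (hj : j < 26)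
    (h : ch.toNat = 97 + j) : (ch :: t).count (lchar j) = t.count (lchar j) + 1 := by
  have h' : lchar j = ch := (lchar_eq_iff j hj ch).mpr h
  simp [h']

lemma count_cons_lchar_ne (t : List Char) (ch : Char) (j : Nat) (hj : j < 26)
    (h : ch.toNat ≠ 97 + j) : (ch :: t).count (lchar j) = t.count (lchar j) := by
  have h' : ch ≠ lchar j := fun he => h ((lchar_eq_iff j hj ch).mp he.symm)
  simp [h']

lemma suf_loop (t : List Char) : ∀ (acc : List Int), acc.length = 26 →
    (t.foldl BsufStep acc).length = 26 ∧
    ∀ j, j < 26 → (t.foldl BsufStep acc).getD j 0 = acc.getD j 0 + (t.count (lchar j) : Int) := by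
  induction t with
  | nil => intro acc hlen; exact ⟨hlen, fun j hj => by simp⟩
  | cons ch t ih =>
    intro acc hlen
    rw [List.foldl_cons]
    by_cases hlow : (0 : Int) ≤ (ch.toNat : Int) - 97 ∧ (ch.toNat : Int) - 97 < 26
    · set q : Nat := ch.toNat - 97 with hq
      have hq26 : q < 26 := by omega
      have hkq : (ch.toNat : Int) - 97 = ((q : Nat) : Int) := by omega
      have hstep : BsufStep acc ch = acc.set q (acc.getD q 0 + 1) := by
        unfold BsufStep
        rw [if_pos hlow, hkq, PySem.List.pySetD_natCast, PySem.List.pyGetD_natCast]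
      have hlen' : (acc.set q (acc.getD q 0 + 1)).length = 26 := by simp [hlen]
      obtain ⟨hL, hG⟩ := ih _ hlen'
      rw [hstep]
      refine ⟨hL, fun j hj => ?_⟩
      rw [hG j hj]
      by_cases hje : j = q
      · subst hje
        rw [count_cons_lchar_eq t ch q hj (by omega)]
        rw [List.getD_eq_getElem _ _ (by omega : q < (acc.set q (acc.getD q 0 + 1)).length),
          List.getElem_set, if_pos rfl, List.getD_eq_getElem _ _ (by omega : q < acc.length)]
        push_cast
        ring
      · rw [count_cons_lchar_ne t ch j hj (by omega)]
        rw [List.getD_eq_getElem _ _ (by omega : j < (acc.set q (acc.getD q 0 + 1)).length),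
          List.getElem_set, if_neg (fun h => hje h.symm), List.getD_eq_getElem _ _ (by omega : j < acc.length)]
    · have hstep : BsufStep acc ch = acc := by unfold BsufStep; rw [if_neg hlow]
      obtain ⟨hL, hG⟩ := ih _ hlen
      rw [hstep]
      refine ⟨hL, fun j hj => ?_⟩
      rw [hG j hj, count_cons_lchar_ne t ch j hj (by omega)]

lemma mem_take_succ (t : List Char) (k : Nat) (hk : k < t.length) (x : Char) :
    x ∈ t.take (k+1) ↔ x ∈ t.take k ∨ x = t[k] := by
  rw [List.take_add_one, List.getElem?_eq_getElem hk]
  simp only [Option.toList_some, List.mem_append, List.mem_cons, List.not_mem_nil, or_false]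

-- change of cnt across one cut position: the non-letter case
lemma cnt_succ_other (t : List Char) (k : Nat) (hk : k < t.length)
    (h : ¬ (97 ≤ (t[k]).toNat ∧ (t[k]).toNat < 123)) : cnt t (k + 1) = cnt t k := by
  have hdrop : t.drop k = t[k] :: t.drop (k+1) := List.drop_eq_getElem_cons hk
  unfold cnt
  apply Finset.sum_congr rfl
  intro j hj
  have hj26 : j < 26 := Finset.mem_range.mp hj
  have hne : lchar j ≠ t[k] := lchar_ne_of_not_low j hj26 _ h
  have e1 : lchar j ∈ t.take (k+1) ↔ lchar j ∈ t.take k := by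
    rw [mem_take_succ t k hk]
    exact or_iff_left hne
  have e2 : lchar j ∈ t.drop k ↔ lchar j ∈ t.drop (k+1) := by
    rw [hdrop, List.mem_cons]
    exact or_iff_right hne
  rw [if_congr (and_congr e1 e2.symm) rfl rfl]

-- change of cnt across one cut position: the lowercase-letter case
lemma cnt_succ_low (t : List Char) (k : Nat) (hk : k < t.length)
    (h97 : 97 ≤ (t[k]).toNat) (h123 : (t[k]).toNat < 123) :
    cnt t (k + 1) = cnt t k + (if t[k] ∈ t.drop (k+1) then 1 else 0)
      - (if t[k] ∈ t.take k then 1 else 0) := by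
  set q : Nat := (t[k]).toNat - 97 with hq
  have hq26 : q < 26 := by omega
  have hlq : lchar q = t[k] := (lchar_eq_iff q hq26 t[k]).mpr (by omega)
  have hdrop : t.drop k = t[k] :: t.drop (k+1) := List.drop_eq_getElem_cons hk
  have key : cnt t (k+1) - cnt t k =
      (if t[k] ∈ t.drop (k+1) then 1 else 0) - (if t[k] ∈ t.take k then 1 else 0) := by
    unfold cnt
    rw [← Finset.sum_sub_distrib]
    rw [Finset.sum_eq_single q]
    · have hfa : (lchar q ∈ t.take (k+1) ∧ lchar q ∈ t.drop (k+1)) ↔ t[k] ∈ t.drop (k+1) := by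
        rw [hlq, mem_take_succ t k hk]
        simp
      have hga : (lchar q ∈ t.take k ∧ lchar q ∈ t.drop k) ↔ t[k] ∈ t.take k := by
        rw [hlq, hdrop, List.mem_cons]
        simp
      rw [if_congr hfa rfl rfl, if_congr hga rfl rfl]
    · intro j hj hjq
      have hj26 : j < 26 := Finset.mem_range.mp hj
      have hne : lchar j ≠ t[k] := by
        intro he
        have := (lchar_eq_iff j hj26 t[k]).mp he
        omega
      have e1 : lchar j ∈ t.take (k+1) ↔ lchar j ∈ t.take k := by
        rw [mem_take_succ t k hk]
        exact or_iff_left hne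
      have e2 : lchar j ∈ t.drop k ↔ lchar j ∈ t.drop (k+1) := by
        rw [hdrop, List.mem_cons]
        exact or_iff_right hne
      rw [if_congr (and_congr e1 e2.symm) rfl rfl, sub_self]
    · intro habs; exact absurd (Finset.mem_range.mpr hq26) habs
  omega

-- loop invariant of B's sweep
def BInv (t : List Char) (k : Nat) (st : List Int × List Bool × Int × Int) : Prop :=
  st.1.length = 26 ∧ st.2.1.length = 26 ∧
  (∀ j, j < 26 → st.1.getD j 0 = ((t.drop k).count (lchar j) : Int)) ∧
  (∀ j, j < 26 → st.2.1.getD j false = decide (lchar j ∈ t.take k)) ∧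
  st.2.2.1 = cnt t k ∧ st.2.2.2 = runMax t k

lemma Bstep_inv (t : List Char) (k : Nat) (hk : k < t.length)
    (st : List Int × List Bool × Int × Int) (hst : BInv t k st) :
    BInv t (k+1) (Bstep st t[k]) := by
  obtain ⟨h1, h2, hsuf, hpre, hsh, han⟩ := hst
  have hdrop : t.drop k = t[k] :: t.drop (k+1) := List.drop_eq_getElem_cons hk
  by_cases hlow : 97 ≤ (t[k]).toNat ∧ (t[k]).toNat < 123
  · -- lowercase letter at the cut
    set q : Nat := (t[k]).toNat - 97 with hq
    have hq26 : q < 26 := by omega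
    have hlq : lchar q = t[k] := (lchar_eq_iff q hq26 t[k]).mpr (by omega)
    have hkq : ((t[k]).toNat : Int) - 97 = ((q : Nat) : Int) := by omega
    have hne_of : ∀ j, j < 26 → j ≠ q → lchar j ≠ t[k] := by
      intro j hj hjq he
      have := (lchar_eq_iff j hj t[k]).mp he
      omega
    have hcq : (t.drop k).count t[k] = (t.drop (k+1)).count t[k] + 1 := by
      rw [hdrop, List.count_cons, if_pos (by simp)]
    have hsufq : st.1.getD q 0 = ((t.drop (k+1)).count t[k] : Int) + 1 := by
      rw [hsuf q hq26, hlq, hcq]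
      push_cast
      ring
    have hsetlen : (st.1.set q (st.1.getD q 0 - 1)).length = 26 := by simp [h1]
    have hnewsuf : ∀ j, j < 26 →
        (st.1.set q (st.1.getD q 0 - 1)).getD j 0 = ((t.drop (k+1)).count (lchar j) : Int) := by
      intro j hj
      rw [List.getD_eq_getElem _ _ (by omega : j < (st.1.set q (st.1.getD q 0 - 1)).length),
        List.getElem_set]
      by_cases hjq : j = q
      · rw [if_pos hjq.symm]
        subst hjq
        rw [hsufq, hlq]
        ring
      · rw [if_neg (fun h => hjq h.symm), ← List.getD_eq_getElem _ _ (by omega : j < st.1.length),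
          hsuf j hj, hdrop, count_cons_lchar_ne _ _ j hj (by omega)]
    have hnewsufq : (st.1.set q (st.1.getD q 0 - 1)).getD q 0 = ((t.drop (k+1)).count t[k] : Int) := by
      rw [hnewsuf q hq26, hlq]
    have hcnt := cnt_succ_low t k hk hlow.1 hlow.2
    have hif : (0 ≤ ((t[k]).toNat : Int) - 97 ∧ ((t[k]).toNat : Int) - 97 < 26) := by omega
    simp only [Bstep]
    rw [if_pos hif]
    simp only [hkq, PySem.List.pySetD_natCast, PySem.List.pyGetD_natCast]
    by_cases hin : t[k] ∈ t.take k
    · -- already seen on the left: pre.getD q = true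
      have hpq : st.2.1.getD q false = true := by
        rw [hpre q hq26, hlq]
        simp [hin]
      rw [hpq]
      simp only [Bool.true_eq_false, if_false]
      have hpre' : ∀ j, j < 26 → st.2.1.getD j false = decide (lchar j ∈ t.take (k+1)) := by
        intro j hj
        rw [hpre j hj]
        apply decide_eq_decide.mpr
        by_cases hjq : j = q
        · subst hjq
          rw [hlq, mem_take_succ t k hk]
          exact ⟨Or.inl, fun _ => hin⟩
        · rw [mem_take_succ t k hk]
          exact (or_iff_left (hne_of j hj hjq)).symm
      by_cases hz : (st.1.set q (st.1.getD q 0 - 1)).getD q 0 = 0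
      · have hnomem : t[k] ∉ t.drop (k+1) := by
          rw [hnewsufq] at hz
          intro hmem
          have := List.count_pos_iff.mpr hmem
          omega
        rw [if_pos hz]
        refine ⟨hsetlen, h2, hnewsuf, hpre', ?_, ?_⟩
        · show st.2.2.1 - 1 = cnt t (k+1)
          rw [hsh, hcnt, if_pos hin, if_neg hnomem]
          omega
        · show (if st.2.2.2 < st.2.2.1 - 1 then st.2.2.1 - 1 else st.2.2.2) = runMax t (k+1)
          rw [hsh, han]
          simp only [runMax]
          rw [hcnt, if_pos hin, if_neg hnomem]
          omega
      · have hmem : t[k] ∈ t.drop (k+1) := by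
          rw [hnewsufq] at hz
          exact List.count_pos_iff.mp (by omega)
        rw [if_neg hz]
        refine ⟨hsetlen, h2, hnewsuf, hpre', ?_, ?_⟩
        · show st.2.2.1 = cnt t (k+1)
          rw [hsh, hcnt, if_pos hin, if_pos hmem]
          omega
        · show (if st.2.2.2 < st.2.2.1 then st.2.2.1 else st.2.2.2) = runMax t (k+1)
          rw [hsh, han]
          simp only [runMax]
          rw [hcnt, if_pos hin, if_pos hmem]
          omega
    · -- new on the left: pre.getD q = false
      have hpq : st.2.1.getD q false = false := by
        rw [hpre q hq26, hlq]
        simp [hin]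
      rw [hpq]
      have hprelen : (st.2.1.set q true).length = 26 := by simp [h2]
      have hnewpre : ∀ j, j < 26 → (st.2.1.set q true).getD j false = decide (lchar j ∈ t.take (k+1)) := by
        intro j hj
        rw [List.getD_eq_getElem _ _ (by omega : j < (st.2.1.set q true).length), List.getElem_set]
        by_cases hjq : j = q
        · rw [if_pos hjq.symm]
          subst hjq
          rw [hlq]
          have hm : t[k] ∈ t.take (k+1) := (mem_take_succ t k hk _).mpr (Or.inr rfl)
          simp [hm]
        · rw [if_neg (fun h => hjq h.symm), ← List.getD_eq_getElem _ _ (by omega : j < st.2.1.length),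
            hpre j hj]
          apply decide_eq_decide.mpr
          rw [mem_take_succ t k hk]
          exact (or_iff_left (hne_of j hj hjq)).symm
      by_cases hz : 0 < (st.1.set q (st.1.getD q 0 - 1)).getD q 0
      · have hmem : t[k] ∈ t.drop (k+1) := by
          rw [hnewsufq] at hz
          exact List.count_pos_iff.mp (by omega)
        rw [if_pos hz]
        refine ⟨hsetlen, hprelen, hnewsuf, hnewpre, ?_, ?_⟩
        · show st.2.2.1 + 1 = cnt t (k+1)
          rw [hsh, hcnt, if_neg hin, if_pos hmem]
          omega
        · show (if st.2.2.2 < st.2.2.1 + 1 then st.2.2.1 + 1 else st.2.2.2) = runMax t (k+1)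
          rw [hsh, han]
          simp only [runMax]
          rw [hcnt, if_neg hin, if_pos hmem]
          omega
      · have hnomem : t[k] ∉ t.drop (k+1) := by
          rw [hnewsufq] at hz
          intro hmem
          have := List.count_pos_iff.mpr hmem
          omega
        rw [if_neg hz]
        refine ⟨hsetlen, hprelen, hnewsuf, hnewpre, ?_, ?_⟩
        · show st.2.2.1 = cnt t (k+1)
          rw [hsh, hcnt, if_neg hin, if_neg hnomem]
          omega
        · show (if st.2.2.2 < st.2.2.1 then st.2.2.1 else st.2.2.2) = runMax t (k+1)
          rw [hsh, han]
          simp only [runMax]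
          rw [hcnt, if_neg hin, if_neg hnomem]
          omega
  · -- not a lowercase letter: nothing changes except the running max update
    have hif : ¬ (0 ≤ ((t[k]).toNat : Int) - 97 ∧ ((t[k]).toNat : Int) - 97 < 26) := by omega
    have hcnt := cnt_succ_other t k hk hlow
    simp only [Bstep]
    rw [if_neg hif]
    refine ⟨h1, h2, ?_, ?_, ?_, ?_⟩
    · intro j hj
      rw [hsuf j hj, hdrop, count_cons_lchar_ne _ _ j hj
        (fun he => (lchar_ne_of_not_low j hj t[k] hlow) ((lchar_eq_iff j hj t[k]).mpr he))]
    · intro j hj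
      rw [hpre j hj]
      apply decide_eq_decide.mpr
      rw [mem_take_succ t k hk]
      exact (or_iff_left (lchar_ne_of_not_low j hj t[k] hlow)).symm
    · show st.2.2.1 = cnt t (k+1)
      rw [hsh, hcnt]
    · show (if st.2.2.2 < st.2.2.1 then st.2.2.1 else st.2.2.2) = runMax t (k+1)
      rw [hsh, han]
      simp only [runMax]
      rw [hcnt]
      omega

lemma main_loop (t : List Char) (S0 : List Int) (hlen : S0.length = 26)
    (hS0 : ∀ j, j < 26 → S0.getD j 0 = (t.count (lchar j) : Int)) :
    ∀ k, k ≤ t.length →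
      BInv t k ((t.take k).foldl Bstep (S0, List.replicate 26 false, 0, 0)) := by
  intro k
  induction k with
  | zero =>
    intro _
    refine ⟨hlen, by simp, fun j hj => by simpa using hS0 j hj,
      fun j hj => ?_, (cnt_zero t).symm, rfl⟩
    show (List.replicate 26 false).getD j false = decide (lchar j ∈ t.take 0)
    rw [List.getD_replicate false hj]
    simp
  | succ k ih =>
    intro hk1
    have hk : k < t.length := by omega
    rw [List.take_add_one, List.getElem?_eq_getElem hk]
    rw [show (t.take k ++ (some t[k]).toList) = t.take k ++ [t[k]] from rfl, List.foldl_append]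
    simp only [List.foldl_cons, List.foldl_nil]
    exact Bstep_inv t k hk _ (ih (by omega))

lemma B_eq (n : Int) (s : String) :
    CutandCount_alt n s = runMax s.toList (min n.toNat s.toList.length) := by
  rw [alt_eq]
  have h0 : 0 ≤ Blimit n s.toList := by unfold Blimit; split_ifs <;> omega
  rw [PySem.List.slice_to _ h0]
  have hLt : (Blimit n s.toList).toNat = min n.toNat s.toList.length := by
    unfold Blimit; split_ifs <;> omega
  rw [hLt]
  obtain ⟨hl, hg⟩ := suf_loop s.toList (List.replicate 26 0) (by simp)
  have hS0 : ∀ j, j < 26 →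
      (s.toList.foldl BsufStep (List.replicate 26 0)).getD j 0 = (s.toList.count (lchar j) : Int) := by
    intro j hj
    rw [hg j hj, List.getD_replicate 0 hj, zero_add]
  exact (main_loop s.toList _ hl hS0 (min n.toNat s.toList.length) (Nat.min_le_right _ _)).2.2.2.2.2

-- ===== VERDICT (by name: the statement is the Claim_ definition above) =====
theorem CutandCount_spec : Claim_equal_CutandCount := by
  intro n s _
  show CutandCount n s = CutandCount_alt n s
  rw [A_eq_runMax, B_eq]
  by_cases h : n.toNat ≤ s.toList.length
  · rw [Nat.min_eq_left h]
  · rw [Nat.min_eq_right (by omega), runMax_of_len_le s.toList n.toNat (by omega)]
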